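-- pv_equiv track=rewrite | github.com/DaweiX/UI-CTX | Scripts/encode.py | java_to_smali_type
-- ===== SOURCE A (Python) =====
-- def java_to_smali_type(java_type):
--     type_mapping = {
--         'void': 'V',
--         'boolean': 'Z',
--         'byte': 'B',
--         'char': 'C',
--         'short': 'S',
--         'int': 'I',
--         'long': 'J',
--         'float': 'F',
--         'double': 'D',
--     }
--
--     if java_type in type_mapping:
--         return type_mapping[java_type]
--
--     if java_type.endswith('[]'):
--         return '[' + java_to_smali_type(java_type[:-2])
--
--     if '<' in java_type:
--         java_type = java_type[:java_type.index('<')]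
--
--     java_type = java_type.replace('.', '/')
--     return f'L{java_type};'
-- ===== SOURCE B (Python) =====
-- def java_to_smali_type(java_type):
--     type_mapping = {
--         'void': 'V',
--         'boolean': 'Z',
--         'byte': 'B',
--         'char': 'C',
--         'short': 'S',
--         'int': 'I',
--         'long': 'J',
--         'float': 'F',
--         'double': 'D',
--     }
--
--     # Peel all trailing array brackets iteratively instead of recursing.
--     depth = 0
--     while java_type.endswith('[]'):
--         java_type = java_type[:-2]
--         depth += 1
--
--     if java_type in type_mapping:
--         base = type_mapping[java_type]
--     else:
--         lt = java_type.find('<')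
--         if lt != -1:
--             java_type = java_type[:lt]
--         base = 'L' + java_type.replace('.', '/') + ';'
--
--     return '[' * depth + base
-- ===== Notes on version B (the rewrite author's own statement) =====
-- stated objective: alternative
-- what changed: Replaces A's recursive array handling (recursing on java_type[:-2] and prefixing '[' per level) with an iterative loop that strips all trailing '[]' pairs while counting depth, then resolves the base type once and prepends '['*depth.
import Mathlib
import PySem

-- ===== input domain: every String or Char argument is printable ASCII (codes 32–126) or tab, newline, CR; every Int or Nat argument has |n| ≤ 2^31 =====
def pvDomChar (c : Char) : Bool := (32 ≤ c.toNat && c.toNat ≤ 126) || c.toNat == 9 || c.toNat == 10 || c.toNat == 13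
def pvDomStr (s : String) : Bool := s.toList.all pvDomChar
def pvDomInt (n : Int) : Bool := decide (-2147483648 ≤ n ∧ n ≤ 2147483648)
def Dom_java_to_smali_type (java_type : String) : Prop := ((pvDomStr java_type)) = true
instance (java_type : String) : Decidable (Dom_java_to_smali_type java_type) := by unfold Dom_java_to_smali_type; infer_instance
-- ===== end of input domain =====

-- B replaces A's recursion on java_type[:-2] by an iterative peel of trailing '[]' with a depth
-- counter; same return value everywhere (objective: alternative decomposition).

-- the dict literal both Pythons contain (Java primitive name → smali code)
def pvTypeMapping : PySem.Dict (List Char) (List Char) :=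
  PySem.Dict.mk [("void".toList, "V".toList), ("boolean".toList, "Z".toList),
    ("byte".toList, "B".toList), ("char".toList, "C".toList), ("short".toList, "S".toList),
    ("int".toList, "I".toList), ("long".toList, "J".toList), ("float".toList, "F".toList),
    ("double".toList, "D".toList)]

-- termination helper for both ports: java_type[:-2] is strictly shorter when it ends with '[]'
theorem pvPeel_lt (cs : List Char) (h : PySem.Chars.endswith cs ['[', ']'] = true) :
    (PySem.Chars.slice cs none (some (-2))).length < cs.length := by
  have hsuf : ['[', ']'] <:+ cs := (PySem.Chars.endswith_iff cs _).mp h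
  have hlen : 2 ≤ cs.length := by
    simpa using hsuf.length_le
  simp [PySem.List.slice]
  omega

-- ===== PORT A =====
-- A's recursion, on the code-point list
def pvACore (cs : List Char) : List Char :=
  match pvTypeMapping.get? cs with
  | some v => v
  | none =>
    if h : PySem.Chars.endswith cs ['[', ']'] = true then
      '[' :: pvACore (PySem.Chars.slice cs none (some (-2)))
    else
      let cs := if PySem.Chars.isIn ['<'] cs then
          PySem.Chars.slice cs none (some (PySem.Chars.find cs ['<']))   -- java_type[:java_type.index('<')]
        else cs
      'L' :: (PySem.Chars.replace cs ['.'] ['/'] ++ [';'])               -- f'L{java_type};'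
termination_by cs.length
decreasing_by exact pvPeel_lt cs h

def java_to_smali_type (java_type : String) : String :=
  String.ofList (pvACore java_type.toList)

-- ===== PORT B =====
-- the while loop of Source B: strip trailing '[]', counting depth
def pvPeel (cs : List Char) (depth : Nat) : Nat × List Char :=
  if h : PySem.Chars.endswith cs ['[', ']'] = true then
    pvPeel (PySem.Chars.slice cs none (some (-2))) (depth + 1)
  else (depth, cs)
termination_by cs.length
decreasing_by exact pvPeel_lt cs h

-- base-type resolution of Source B (mapping lookup, else truncate at '<', replace '.'→'/', wrap)
def pvBResolve (cs : List Char) : List Char :=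
  match pvTypeMapping.get? cs with
  | some v => v
  | none =>
    let lt := PySem.Chars.find cs ['<']
    let cs := if lt ≠ -1 then PySem.Chars.slice cs none (some lt) else cs
    'L' :: (PySem.Chars.replace cs ['.'] ['/'] ++ [';'])

def java_to_smali_type_alt (java_type : String) : String :=
  let p := pvPeel java_type.toList 0
  String.ofList (List.replicate p.1 '[' ++ pvBResolve p.2)

-- ===== PRECONDITION & SPEC =====
def Spec_java_to_smali_type (java_type : String) (out : String) : Prop := out = java_to_smali_type_alt java_type
instance (java_type : String) (out : String) : Decidable (Spec_java_to_smali_type java_type out) := by unfold Spec_java_to_smali_type; infer_instance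

-- ===== CLAIM (what is proved, stated in full; the proofs are below) =====
def Claim_equal_java_to_smali_type : Prop := ∀ (java_type : String), Dom_java_to_smali_type java_type → Spec_java_to_smali_type java_type (java_to_smali_type java_type)

-- ===== LEMMAS AND PROOFS =====

-- no key of the mapping ends with '[]'
theorem pvGet?_endswith (cs : List Char) (v : List Char)
    (h : pvTypeMapping.get? cs = some v) : PySem.Chars.endswith cs ['[', ']'] = false := by
  simp only [pvTypeMapping, PySem.Dict.get?_mk_cons] at h
  split_ifs at h with h1 h2 h3 h4 h5 h6 h7 h8 h9 <;>
    first
      | (cases eq_of_beq h1; decide)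
      | (cases eq_of_beq h2; decide)
      | (cases eq_of_beq h3; decide)
      | (cases eq_of_beq h4; decide)
      | (cases eq_of_beq h5; decide)
      | (cases eq_of_beq h6; decide)
      | (cases eq_of_beq h7; decide)
      | (cases eq_of_beq h8; decide)
      | (cases eq_of_beq h9; decide)
      | simp [PySem.Dict.get?] at h

-- accumulator shift for the peel loop
theorem pvPeel_acc (cs : List Char) (d : Nat) :
    pvPeel cs d = ((pvPeel cs 0).1 + d, (pvPeel cs 0).2) := by
  generalize hn : cs.length = n
  induction n using Nat.strong_induction_on generalizing cs d with
  | _ n ih =>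
    by_cases h : PySem.Chars.endswith cs ['[', ']'] = true
    · rw [pvPeel, dif_pos h]
      conv_rhs => rw [pvPeel, dif_pos h]
      rw [ih _ (hn ▸ pvPeel_lt cs h) _ (d + 1) rfl, ih _ (hn ▸ pvPeel_lt cs h) _ (0 + 1) rfl]
      simp only [Prod.mk.injEq]
      exact ⟨by omega, trivial⟩
    · rw [pvPeel, dif_neg h]
      conv_rhs => rw [pvPeel, dif_neg h]
      simp

-- when no trailing '[]' remains, A's else-processing is B's base resolution
theorem pvBase_eq (cs : List Char) (h : PySem.Chars.endswith cs ['[', ']'] = false) :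
    pvACore cs = pvBResolve cs := by
  rw [pvACore, pvBResolve]
  cases hm : pvTypeMapping.get? cs with
  | some v => rfl
  | none =>
    simp only [h, Bool.false_eq_true, dite_false]
    by_cases hin : PySem.Chars.isIn ['<'] cs = true
    · have hf : PySem.Chars.find cs ['<'] ≠ -1 := by
        rw [PySem.Chars.find_ne_neg_one_iff]
        exact (PySem.Chars.isIn_iff_infix _ _).mp hin
      simp [hin, hf]
    · have hf : PySem.Chars.find cs ['<'] = -1 := by
        rw [PySem.Chars.find_eq_neg_one_iff]
        exact fun hc => hin ((PySem.Chars.isIn_iff_infix _ _).mpr hc)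
      simp [hin, hf]

-- main invariant: A's recursion computes '['*depth ++ resolved base of the peeled string
theorem pvMain (cs : List Char) :
    pvACore cs = List.replicate (pvPeel cs 0).1 '[' ++ pvBResolve (pvPeel cs 0).2 := by
  generalize hn : cs.length = n
  induction n using Nat.strong_induction_on generalizing cs with
  | _ n ih =>
    by_cases h : PySem.Chars.endswith cs ['[', ']'] = true
    · have hm : pvTypeMapping.get? cs = none := by
        cases hm : pvTypeMapping.get? cs with
        | none => rfl
        | some v => rw [pvGet?_endswith cs v hm] at h; exact absurd h (by simp)
      have hA : pvACore cs = '[' :: pvACore (PySem.Chars.slice cs none (some (-2))) := by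
        rw [pvACore, hm]; simp [h]
      rw [hA, pvPeel, dif_pos h, pvPeel_acc,
        ih _ (hn ▸ pvPeel_lt cs h) _ rfl]
      simp [List.replicate_succ]
    · rw [pvPeel, dif_neg h]
      simpa using pvBase_eq cs (by simpa using h)

-- ===== VERDICT (by name: the statement is the Claim_ definition above) =====
theorem java_to_smali_type_spec : Claim_equal_java_to_smali_type := by
  intro s _
  unfold Spec_java_to_smali_type java_to_smali_type java_to_smali_type_alt
  rw [pvMain]
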